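-- pv_equiv track=rewrite | github.com/algoritmos-e-estrutura-de-dados/lab05-troca-figurinhas-PedroGXV | labs/atividade-05/main.py | maximizar_troca_de_figurinhas
-- ===== SOURCE A (Python) =====
-- def maximizar_troca_de_figurinhas(figurinhas_da_maria, figurinhas_do_joao):
--
--     # interprete estas variaveis como quais cartas cada um vai dar em troca da outra
--     maria_gives = []
--     joao_gives = []
--
--     for figurinha_maria in figurinhas_da_maria:
--         # caso joao ja tenha a figurinha da maria, pule
--         if (figurinha_maria in figurinhas_do_joao):
--             continue
--
--         # caso algum dos dois ja tenha dado esta carta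
--         if (figurinha_maria in maria_gives or figurinha_maria in joao_gives):
--             continue
--
--         for figurinha_joao in figurinhas_do_joao:
--             # caso maria ja tenha a figurinha do joao, pule
--             if (figurinha_joao in figurinhas_da_maria):
--                 continue
--
--             # caso algum dos dois ja tenha dado esta carta
--             if (figurinha_joao in joao_gives or figurinha_joao in maria_gives):
--                 continue
--
--             maria_gives.append(figurinha_maria)
--             joao_gives.append(figurinha_joao)
--             break
--
--     return len(maria_gives)
-- ===== SOURCE B (Python) =====
-- def maximizar_troca_de_figurinhas(figurinhas_da_maria, figurinhas_do_joao):
--     maria_set = set(figurinhas_da_maria)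
--     joao_set = set(figurinhas_do_joao)
--     return min(len(maria_set - joao_set), len(joao_set - maria_set))
-- ===== Notes on version B (the rewrite author's own statement) =====
-- stated objective: faster
-- what changed: Replaced the nested rescanning loops over both lists with two set differences: the answer is min(|distinct Maria-only cards|, |distinct Joao-only cards|).
import Mathlib
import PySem

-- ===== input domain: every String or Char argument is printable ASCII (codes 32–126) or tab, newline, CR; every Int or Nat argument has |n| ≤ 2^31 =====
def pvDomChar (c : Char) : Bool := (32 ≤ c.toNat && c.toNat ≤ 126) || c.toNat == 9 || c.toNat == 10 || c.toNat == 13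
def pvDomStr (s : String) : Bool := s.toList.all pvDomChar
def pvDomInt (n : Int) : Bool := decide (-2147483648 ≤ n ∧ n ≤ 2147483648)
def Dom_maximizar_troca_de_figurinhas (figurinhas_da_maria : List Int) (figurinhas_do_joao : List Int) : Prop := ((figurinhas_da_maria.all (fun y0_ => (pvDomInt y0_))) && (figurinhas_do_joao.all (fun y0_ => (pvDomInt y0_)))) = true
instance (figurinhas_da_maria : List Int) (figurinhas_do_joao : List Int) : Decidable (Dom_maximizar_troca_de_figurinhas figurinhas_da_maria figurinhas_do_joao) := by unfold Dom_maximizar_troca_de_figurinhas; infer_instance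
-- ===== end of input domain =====

-- B replaces A's nested rescanning loops by two set differences: the answer is
-- min(|distinct Maria-only cards|, |distinct Joao-only cards|)  (objective: faster).


-- ===== PORT A =====
-- the inner 'for figurinha_joao in figurinhas_do_joao: … break' loop of A
def pvInner (figurinhas_da_maria : List Int) (maria_gives joao_gives : List Int)
    (figurinha_maria : Int) : List Int → List Int × List Int
  | [] => (maria_gives, joao_gives)
  | figurinha_joao :: rest =>
    if figurinhas_da_maria.contains figurinha_joao then
      pvInner figurinhas_da_maria maria_gives joao_gives figurinha_maria rest
    else if joao_gives.contains figurinha_joao || maria_gives.contains figurinha_joao then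
      pvInner figurinhas_da_maria maria_gives joao_gives figurinha_maria rest
    else
      (maria_gives ++ [figurinha_maria], joao_gives ++ [figurinha_joao])

-- one iteration of A's outer loop; state = (maria_gives, joao_gives)
def pvOuterStep (figurinhas_da_maria figurinhas_do_joao : List Int)
    (st : List Int × List Int) (figurinha_maria : Int) : List Int × List Int :=
  if figurinhas_do_joao.contains figurinha_maria then st
  else if st.1.contains figurinha_maria || st.2.contains figurinha_maria then st
  else pvInner figurinhas_da_maria st.1 st.2 figurinha_maria figurinhas_do_joao

def maximizar_troca_de_figurinhas (figurinhas_da_maria : List Int) (figurinhas_do_joao : List Int) : Int :=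
  ((figurinhas_da_maria.foldl (pvOuterStep figurinhas_da_maria figurinhas_do_joao) ([], [])).1.length : Int)

-- ===== PORT B =====
def maximizar_troca_de_figurinhas_alt (figurinhas_da_maria : List Int) (figurinhas_do_joao : List Int) : Int :=
  let maria_set : PySem.Set Int := PySem.Set.ofList figurinhas_da_maria
  let joao_set : PySem.Set Int := PySem.Set.ofList figurinhas_do_joao
  min (PySem.Set.len (PySem.Set.diff maria_set joao_set)) (PySem.Set.len (PySem.Set.diff joao_set maria_set))

-- ===== PRECONDITION & SPEC =====
def Spec_maximizar_troca_de_figurinhas (figurinhas_da_maria : List Int) (figurinhas_do_joao : List Int) (out : Int) : Prop := out = maximizar_troca_de_figurinhas_alt figurinhas_da_maria figurinhas_do_joao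
instance (figurinhas_da_maria : List Int) (figurinhas_do_joao : List Int) (out : Int) : Decidable (Spec_maximizar_troca_de_figurinhas figurinhas_da_maria figurinhas_do_joao out) := by unfold Spec_maximizar_troca_de_figurinhas; infer_instance

-- ===== CLAIM (what is proved, stated in full; the proofs are below) =====
def Claim_equal_maximizar_troca_de_figurinhas : Prop := ∀ (figurinhas_da_maria : List Int) (figurinhas_do_joao : List Int), Dom_maximizar_troca_de_figurinhas figurinhas_da_maria figurinhas_do_joao → Spec_maximizar_troca_de_figurinhas figurinhas_da_maria figurinhas_do_joao (maximizar_troca_de_figurinhas figurinhas_da_maria figurinhas_do_joao)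

-- ===== LEMMAS AND PROOFS =====

-- the distinct Maria-only cards (first occurrences, in order), and likewise for Joao
def pvOnly (xs ys : List Int) : List Int := PySem.Set.ofList (xs.filter (fun x => !(ys.contains x)))

-- the invariant state of A's outer loop after processing the prefix p of Maria's list
def pvState (p j m : List Int) : List Int × List Int :=
  ((pvOnly p j).take (pvOnly j m).length,
   (pvOnly j m).take ((pvOnly p j).take (pvOnly j m).length).length)

lemma find?_congr' (l : List Int) (p q : Int → Bool) (h : ∀ x ∈ l, p x = q x) :
    l.find? p = l.find? q := by
  induction l with
  | nil => rfl
  | cons a t ih => simp [List.find?_cons, h a (by simp)]; split <;> simp_all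

lemma filter_ofList (l : List Int) (p : Int → Bool) :
    (PySem.Set.ofList l).filter p = PySem.Set.ofList (l.filter p) := by
  induction l with
  | nil => rfl
  | cons x t ih =>
    by_cases hx : p x
    · have h : (x :: t).filter p = x :: t.filter p := by simp [hx]
      rw [h, PySem.Set.ofList_cons, PySem.Set.ofList_cons]
      simp only [PySem.Set.discard, List.filter_cons, hx, if_pos, ← ih, List.filter_filter]
      congr 1
      apply List.filter_congr
      intro y _
      exact Bool.and_comm _ _
    · have h : (x :: t).filter p = t.filter p := by simp [hx]
      rw [h, PySem.Set.ofList_cons, ← ih]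
      simp only [PySem.Set.discard, List.filter_cons, hx, List.filter_filter]
      rw [if_neg (by simp)]
      apply List.filter_congr
      intro y _
      by_cases hy : y = x
      · subst hy; simp [hx]
      · simp [hy]

lemma ofList_filter_cons_pos (t : List Int) (x : Int) (q : Int → Bool) (hq : q x = true) :
    PySem.Set.ofList ((x :: t).filter q)
      = x :: PySem.Set.ofList (t.filter (fun y => q y && !(y == x))) := by
  have h : (x :: t).filter q = x :: t.filter q := by simp [hq]
  rw [h, PySem.Set.ofList_cons]
  congr 1
  show (PySem.Set.ofList (t.filter q)).filter _ = _
  rw [filter_ofList, List.filter_filter]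
  congr 1
  apply List.filter_congr
  intro y _
  exact Bool.and_comm _ _

lemma find?_take (q : Int → Bool) (l : List Int) (k : Nat) :
    l.find? (fun x => q x && !((PySem.Set.ofList (l.filter q)).take k).contains x)
      = (PySem.Set.ofList (l.filter q))[k]? := by
  induction l generalizing q k with
  | nil => simp [PySem.Set.ofList]
  | cons x t ih =>
    by_cases hq : q x
    · rw [ofList_filter_cons_pos t x q hq]
      cases k with
      | zero =>
        rw [List.take_zero, List.find?_cons]
        simp [hq]
      | succ k =>
        rw [List.take_succ_cons, List.find?_cons]
        have hx : (q x && !((x :: (PySem.Set.ofList (t.filter fun y => q y && !(y == x))).take k).contains x)) = false := by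
          simp
        rw [hx]
        have hcongr := find?_congr' t
          (fun y => q y && !((x :: (PySem.Set.ofList (t.filter fun y => q y && !(y == x))).take k).contains y))
          (fun y => (q y && !(y == x)) && !(((PySem.Set.ofList (t.filter fun y => q y && !(y == x))).take k).contains y))
          (by
            intro y _
            by_cases hy : y = x
            · subst hy; simp
            · simp only [List.contains_cons, Bool.and_assoc]
              cases hqy : q y <;> simp)
        rw [hcongr, ih (fun y => q y && !(y == x)) k]
        simp
    · have h : (x :: t).filter q = t.filter q := by simp [hq]
      rw [h, List.find?_cons]
      have hx : (q x && !((PySem.Set.ofList (t.filter q)).take k).contains x) = false := by simp [hq]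
      rw [hx]
      exact ih q k

lemma pvInner_eq_find? (m mg jg : List Int) (fm : Int) (l : List Int) :
    pvInner m mg jg fm l =
      match l.find? (fun fj => !(m.contains fj) && !(jg.contains fj || mg.contains fj)) with
      | none => (mg, jg)
      | some fj => (mg ++ [fm], jg ++ [fj]) := by
  induction l with
  | nil => rfl
  | cons fj rest ih =>
    simp only [pvInner, List.find?_cons]
    by_cases h1 : fj ∈ m <;> by_cases h2 : fj ∈ jg <;> by_cases h3 : fj ∈ mg <;>
      simp [h1, h2, h3, ih]

lemma mem_pvOnly (xs ys : List Int) (x : Int) :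
    x ∈ pvOnly xs ys ↔ x ∈ xs ∧ x ∉ ys := by
  simp [pvOnly, PySem.Set.mem_ofList, List.mem_filter]

lemma pvStep_core (m j : List Int) (M J : List Int) (fm : Int) (M' : List Int)
    (hMj : ∀ x ∈ M, x ∉ j)
    (hJdef : J = PySem.Set.ofList (j.filter (fun x => !(m.contains x))))
    (hM' : M' = (if fm ∈ j then M else PySem.Set.add M fm)) :
    pvOuterStep m j (M.take J.length, J.take (M.take J.length).length) fm
      = (M'.take J.length, J.take (M'.take J.length).length) := by
  have hJj : ∀ x ∈ J, x ∈ j := by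
    intro x hx
    rw [hJdef] at hx
    exact (List.mem_filter.1 ((PySem.Set.mem_ofList _ _).1 hx)).1
  unfold pvOuterStep
  by_cases hfm : fm ∈ j
  · rw [if_pos (by simpa using hfm)]
    rw [hM', if_pos hfm]
  · have hjg_fm : fm ∉ J.take (M.take J.length).length :=
      fun h => hfm (hJj fm (List.mem_of_mem_take h))
    rw [if_neg (by simpa using hfm), hM', if_neg hfm]
    by_cases hmem : fm ∈ M.take J.length
    · rw [if_pos (by simp [hmem])]
      rw [PySem.Set.add_of_mem (List.mem_of_mem_take hmem)]
    · have hjg_fm' : fm ∉ List.take (min J.length M.length) J := by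
        simpa [List.length_take] using hjg_fm
      rw [if_neg (by simp [hmem, hjg_fm'])]
      simp only []
      rw [pvInner_eq_find?]
      have hcongr := find?_congr' j
        (fun fj => !(m.contains fj) && !((J.take (M.take J.length).length).contains fj || (M.take J.length).contains fj))
        (fun y => (fun x => !(m.contains x)) y && !((PySem.Set.ofList (j.filter (fun x => !(m.contains x)))).take (M.take J.length).length).contains y)
        (by
          intro y hy
          have hymg : y ∉ M.take J.length := fun h => hMj y (List.mem_of_mem_take h) hy
          rw [hJdef] at hymg
          have hJdef' := hJdef
          simp only [List.contains_eq_mem] at hJdef' hymg ⊢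
          rw [← hJdef'] at hymg ⊢
          simp [hymg])
      rw [hcongr, find?_take (fun x => !(m.contains x)) j (M.take J.length).length, ← hJdef]
      have hkmin : (M.take J.length).length = min J.length M.length := List.length_take
      rcases hcase : J[(M.take J.length).length]? with _ | fj
      · -- Joao has no spare card left: state unchanged
        have hlen : J.length ≤ (M.take J.length).length := by
          simpa using List.getElem?_eq_none_iff.1 hcase
        have hJM : J.length ≤ M.length := by omega
        have htake : (PySem.Set.add M fm).take J.length = M.take J.length := by
          rw [PySem.Set.add_eq_ite]
          split
          · rfl
          · rw [List.take_append_of_le_length hJM]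
        rw [htake]
      · -- a swap happens: Maria gives fm, Joao gives J[k]
        have hlt : (M.take J.length).length < J.length := (List.getElem?_eq_some_iff.1 hcase).1
        have hMfull : M.take J.length = M := List.take_of_length_le (by omega)
        have hfmM : fm ∉ M := by rw [← hMfull]; exact hmem
        rw [PySem.Set.add_of_not_mem hfmM]
        have htake1 : (M ++ [fm]).take J.length = M ++ [fm] :=
          List.take_of_length_le (by simp; omega)
        rw [htake1, hMfull]
        have hMk : M.length = (M.take J.length).length := by rw [hMfull]
        have htake2 : J.take (M ++ [fm]).length = J.take M.length ++ [fj] := by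
          have hlen1 : (M ++ [fm]).length = M.length + 1 := by simp
          rw [hlen1, List.take_add_one]
          rw [hMfull] at hcase
          rw [hcase]
          rfl
        rw [htake2]

lemma pvStep_spec (m j p : List Int) (fm : Int) :
    pvOuterStep m j (pvState p j m) fm = pvState (p ++ [fm]) j m := by
  have hM' : pvOnly (p ++ [fm]) j
      = (if fm ∈ j then pvOnly p j else PySem.Set.add (pvOnly p j) fm) := by
    unfold pvOnly
    rw [List.filter_append]
    by_cases hfm : fm ∈ j
    · rw [if_pos hfm]
      simp [hfm]
    · rw [if_neg hfm, ← PySem.Set.ofList_append_singleton]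
      congr 2
      simp [hfm]
  have h := pvStep_core m j (pvOnly p j) (pvOnly j m) fm (pvOnly (p ++ [fm]) j)
    (fun x hx => ((mem_pvOnly p j x).1 hx).2) rfl hM'
  exact h

lemma pvFold_spec (m j : List Int) : ∀ (rest p : List Int),
    rest.foldl (pvOuterStep m j) (pvState p j m) = pvState (p ++ rest) j m := by
  intro rest
  induction rest with
  | nil => intro p; simp
  | cons fm t ih =>
    intro p
    simp only [List.foldl_cons, pvStep_spec]
    rw [ih (p ++ [fm])]
    simp

lemma pvOnly_eq_diff (xs ys : List Int) :
    PySem.Set.diff (PySem.Set.ofList xs) (PySem.Set.ofList ys) = pvOnly xs ys := by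
  unfold pvOnly PySem.Set.diff
  rw [← filter_ofList]
  apply List.filter_congr
  intro x _
  simp [PySem.Set.contains_eq_listContains, PySem.Set.mem_ofList]

-- ===== VERDICT (by name: the statement is the Claim_ definition above) =====
theorem maximizar_troca_de_figurinhas_spec : Claim_equal_maximizar_troca_de_figurinhas := by
  intro m j _
  unfold Spec_maximizar_troca_de_figurinhas maximizar_troca_de_figurinhas maximizar_troca_de_figurinhas_alt
  have h0 : (([], []) : List Int × List Int) = pvState [] j m := by
    simp [pvState, pvOnly, PySem.Set.ofList]
  rw [h0, pvFold_spec m j m []]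
  simp only [pvState, PySem.Set.len, List.length_take, List.nil_append, pvOnly_eq_diff]
  push_cast
  omega
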